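-- pv_equiv track=rewrite | github.com/1998x-stack/Recommendation-System-Tutorial | 第4章_Embedding技术在推荐系统中的应用/4.3_Item2vec——Word2vec_在推荐系统领域的推广/00_4.3.1_Item2vec的基本原理.py | _create_vocab
-- ===== SOURCE A (Python) =====
-- from typing import List, Tuple, Dict
--
-- def _create_vocab(sequences: List[List[int]]) -> Tuple[Dict[int, int], Dict[int, int]]:
--     """
--     创建物品和索引之间的映射。
--
--     Args:
--         sequences: 用户的物品交互序列列表。
--
--     Returns:
--         item_to_idx: 物品到索引的映射字典。
--         idx_to_item: 索引到物品的映射字典。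
--     """
--     item_to_idx = {}
--     idx_to_item = {}
--     idx = 0
--     for seq in sequences:
--         for item in seq:
--             if item not in item_to_idx:
--                 item_to_idx[item] = idx
--                 idx_to_item[idx] = item
--                 idx += 1
--     return item_to_idx, idx_to_item
-- ===== SOURCE B (Python) =====
-- from typing import List, Tuple, Dict
--
-- def _create_vocab(sequences: List[List[int]]) -> Tuple[Dict[int, int], Dict[int, int]]:
--     # Sort the distinct items by the position of their first occurrence in the
--     # flattened stream: first indices are unique per distinct item, so this
--     # reproduces first-seen order deterministically.
--     flat = [item for seq in sequences for item in seq]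
--     items = sorted(set(flat), key=flat.index)
--     item_to_idx = dict(zip(items, range(len(items))))
--     idx_to_item = dict(enumerate(items))
--     return item_to_idx, idx_to_item
-- ===== Notes on version B (the rewrite author's own statement) =====
-- stated objective: alternative
-- what changed: Replaces A's single lockstep pass maintaining two dicts and a counter with a set-then-sort algorithm: take set(flat) and sort the distinct items by their first position in the flattened stream (flat.index, injective on distinct items, hence order is first-seen), then build the two maps with zip/enumerate; trades A's linear dedup loop for sorting with a positional key.
import Mathlib
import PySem

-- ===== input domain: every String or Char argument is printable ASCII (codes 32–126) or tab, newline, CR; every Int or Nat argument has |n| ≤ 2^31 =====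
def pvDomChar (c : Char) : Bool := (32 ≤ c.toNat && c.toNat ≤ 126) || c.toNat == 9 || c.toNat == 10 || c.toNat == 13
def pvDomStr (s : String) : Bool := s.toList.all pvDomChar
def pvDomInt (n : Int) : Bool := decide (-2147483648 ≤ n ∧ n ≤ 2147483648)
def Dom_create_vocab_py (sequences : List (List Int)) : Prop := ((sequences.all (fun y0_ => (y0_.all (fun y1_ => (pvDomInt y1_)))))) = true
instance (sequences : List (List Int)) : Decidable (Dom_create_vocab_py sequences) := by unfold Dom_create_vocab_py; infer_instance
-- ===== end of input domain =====

-- B replaces A's lockstep dedup loop by set-then-sort: sort the distinct items by first position in the flattened stream; objective: alternative.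

-- ===== PORT A =====
-- state: (item_to_idx, idx_to_item, idx); dicts have distinct keys, so they are plain association lists in insertion order
def create_vocab_py (sequences : List (List Int)) : (List (Int × Int)) × (List (Int × Int)) :=
  let st :=
    sequences.foldl (fun st seq =>
      seq.foldl (fun (st : List (Int × Int) × List (Int × Int) × Int) item =>
        if (st.1.map Prod.fst).contains item then st
        else (st.1 ++ [(item, st.2.2)], st.2.1 ++ [(st.2.2, item)], st.2.2 + 1)) st)
      (([], [], 0) : List (Int × Int) × List (Int × Int) × Int)
  (st.1, st.2.1)

-- ===== PORT B =====
-- flat.index(x) always succeeds here (x ∈ flat), so the getD default is never read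
def create_vocab_py_alt (sequences : List (List Int)) : (List (Int × Int)) × (List (Int × Int)) :=
  let flat := sequences.flatMap id
  let items := PySem.List.sorted (PySem.Set.ofList flat) (fun x => (PySem.List.index? flat x).getD 0)
  (items.zip (PySem.List.pyRange 0 (items.length : Int) 1),
   PySem.List.enumerate items 0)

-- ===== PRECONDITION & SPEC =====
def Spec_create_vocab_py (sequences : List (List Int)) (out : (List (Int × Int)) × (List (Int × Int))) : Prop := out = create_vocab_py_alt sequences
instance (sequences : List (List Int)) (out : (List (Int × Int)) × (List (Int × Int))) : Decidable (Spec_create_vocab_py sequences out) := by unfold Spec_create_vocab_py; infer_instance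

-- ===== CLAIM (what is proved, stated in full; the proofs are below) =====
def Claim_equal_create_vocab_py : Prop := ∀ (sequences : List (List Int)), Dom_create_vocab_py sequences → Spec_create_vocab_py sequences (create_vocab_py sequences)

-- ===== LEMMAS AND PROOFS =====

/-- the A-side state corresponding to a seen-list `u` of distinct items -/
def pvMkSt (u : List Int) : List (Int × Int) × List (Int × Int) × Int :=
  ((PySem.List.enumerate u 0).map (fun p => (p.2, p.1)),
   (PySem.List.enumerate u 0).map (fun p => (p.1, p.2)),
   (u.length : Int))

theorem pvMkSt_keys (u : List Int) : (pvMkSt u).1.map Prod.fst = u := by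
  simp [pvMkSt, List.map_map]
  exact PySem.List.map_snd_enumerate u 0

theorem pvStep_mkSt (u : List Int) (item : Int) :
    (if ((pvMkSt u).1.map Prod.fst).contains item then pvMkSt u
     else ((pvMkSt u).1 ++ [(item, (pvMkSt u).2.2)],
           (pvMkSt u).2.1 ++ [((pvMkSt u).2.2, item)], (pvMkSt u).2.2 + 1))
    = pvMkSt (PySem.Set.add u item) := by
  rw [pvMkSt_keys]
  by_cases h : item ∈ u
  · simp [PySem.Set.add, PySem.Set.contains, h]
  · simp only [PySem.Set.add, PySem.Set.contains, List.contains_iff_mem, h, if_false]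
    simp [pvMkSt, PySem.List.enumerate_append]

theorem pvFold_seq (seq u : List Int) :
    seq.foldl (fun (st : List (Int × Int) × List (Int × Int) × Int) item =>
        if (st.1.map Prod.fst).contains item then st
        else (st.1 ++ [(item, st.2.2)], st.2.1 ++ [(st.2.2, item)], st.2.2 + 1)) (pvMkSt u)
    = pvMkSt (seq.foldl PySem.Set.add u) := by
  induction seq generalizing u with
  | nil => rfl
  | cons x xs ih =>
    simp only [List.foldl_cons]
    rw [pvStep_mkSt, ih]

theorem pvFold_seqs (seqs : List (List Int)) (u : List Int) :
    seqs.foldl (fun st seq =>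
      seq.foldl (fun (st : List (Int × Int) × List (Int × Int) × Int) item =>
        if (st.1.map Prod.fst).contains item then st
        else (st.1 ++ [(item, st.2.2)], st.2.1 ++ [(st.2.2, item)], st.2.2 + 1)) st) (pvMkSt u)
    = pvMkSt ((seqs.flatMap id).foldl PySem.Set.add u) := by
  induction seqs generalizing u with
  | nil => rfl
  | cons s ss ih =>
    simp only [List.foldl_cons, List.flatMap_cons, List.foldl_append, id]
    rw [pvFold_seq, ih]

/-- the first-occurrence positions along `PySem.Set.ofList xs` are nondecreasing -/
theorem pvPairwise_idx (xs : List Int) :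
    (PySem.Set.ofList xs).Pairwise
      (fun a b => ((PySem.List.index? xs a).getD 0 : Nat) ≤ (PySem.List.index? xs b).getD 0) := by
  induction xs with
  | nil => simp [PySem.Set.ofList_nil]
  | cons x xs ih =>
    rw [PySem.Set.ofList_cons]
    constructor
    · intro b _
      rw [PySem.List.index?_cons_self]
      simp
    · have hf : ((PySem.Set.ofList xs).discard x).Pairwise
          (fun a b => ((PySem.List.index? xs a).getD 0 : Nat) ≤ (PySem.List.index? xs b).getD 0) := by
        rw [PySem.Set.discard.eq_1]
        exact ih.filter _
      refine hf.imp_of_mem ?_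
      intro a b ha hb hab
      have hax : a ≠ x := ((PySem.Set.mem_discard _ _ _).1 ha).2
      have hbx : b ≠ x := ((PySem.Set.mem_discard _ _ _).1 hb).2
      rw [PySem.List.index?_cons_of_ne xs (Ne.symm hax),
          PySem.List.index?_cons_of_ne xs (Ne.symm hbx)]
      cases hia : PySem.List.index? xs a with
      | none => simp
      | some i =>
        cases hib : PySem.List.index? xs b with
        | none =>
          exfalso
          have hbm : b ∈ xs := (PySem.Set.mem_ofList _ _).1 ((PySem.Set.mem_discard _ _ _).1 hb).1
          rw [PySem.List.index?_eq_none_iff] at hib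
          exact hib hbm
        | some j =>
          simp only [hia, hib, Option.getD_some, Option.map_some] at hab ⊢
          omega

/-- zip with the index range is enumerate with the pair swapped -/
theorem pvZip_range (xs : List Int) (s : Int) :
    xs.zip (PySem.List.pyRange s (s + (xs.length : Int)) 1)
    = (PySem.List.enumerate xs s).map (fun p => (p.2, p.1)) := by
  induction xs generalizing s with
  | nil => simp [PySem.List.enumerate_nil]
  | cons x xs ih =>
    have hlt : s < s + ((x :: xs).length : Int) := by
      simp only [List.length_cons]
      push_cast
      omega
    rw [PySem.List.pyRange_one_cons hlt, PySem.List.enumerate_cons]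
    simp only [List.zip_cons_cons, List.map_cons, List.length_cons]
    congr 1
    have h2 : s + ((xs.length + 1 : Nat) : Int) = (s + 1) + (xs.length : Int) := by
      push_cast; omega
    rw [h2, ih]

-- ===== VERDICT (by name: the statement is the Claim_ definition above) =====
theorem create_vocab_py_spec : Claim_equal_create_vocab_py := by
  intro sequences _
  show create_vocab_py sequences = create_vocab_py_alt sequences
  unfold create_vocab_py create_vocab_py_alt
  dsimp only
  have h := pvFold_seqs sequences []
  simp only [pvMkSt] at h
  simp only [PySem.List.enumerate_nil, List.map_nil, List.length_nil, Nat.cast_zero] at h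
  rw [h]
  have hitems :
      PySem.List.sorted (PySem.Set.ofList (sequences.flatMap id))
        (fun x => ((PySem.List.index? (sequences.flatMap id) x).getD 0 : Nat))
      = PySem.Set.ofList (sequences.flatMap id) :=
    PySem.List.sorted_eq_self_of_pairwise _ _ (pvPairwise_idx _)
  rw [show (sequences.flatMap id).foldl PySem.Set.add []
        = PySem.Set.ofList (sequences.flatMap id) from (PySem.Set.ofList_eq_foldl _).symm]
  rw [hitems]
  have hz := pvZip_range (PySem.Set.ofList (sequences.flatMap id)) 0
  rw [zero_add] at hz
  rw [hz]
  simp
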